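-- pv_equiv track=rewrite | github.com/Black2-o/ProblemSolving | YCPC/TheInfiniteClockTower.py | count_digits_after_hours
-- ===== SOURCE A (Python) =====
-- def count_digits_after_hours(N, H):
--     digits = [int(d) for d in str(N)]
--
--     for _ in range(H):
--         new_digits = []
--         for d in digits:
--             new_d = d + 2
--             if new_d > 9:
--                 new_digits.extend(divmod(new_d, 10))
--             else:
--                 new_digits.append(new_d)
--         digits = new_digits
--
--     return len(digits)
-- ===== SOURCE B (Python) =====
-- def count_digits_after_hours(N, H):
--     # Closed form per starting digit: a digit d needs s = (11 - d) // 2 hours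
--     # to split into two digits, and each resulting digit thereafter doubles
--     # the count every 5 hours, giving 2 ** ((H - s) // 5 + 1) digits.
--     total = 0
--     for c in str(N):
--         d = int(c)
--         s = (11 - d) // 2
--         total += 1 if H < s else 2 ** ((H - s) // 5 + 1)
--     return total
-- ===== Notes on version B (the rewrite author's own statement) =====
-- stated objective: faster
-- what changed: Instead of simulating the digit list hour by hour (its length doubles roughly every 5 hours), B sums a proved closed form per digit of N: each digit d splits after s=(11-d)//2 hours and then contributes 2**((H-s)//5+1) digits; intended as faster — a timing run saw A time out at n=64 where B still returned, though no ratio could be measured at sizes where both finish.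
import Mathlib
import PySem

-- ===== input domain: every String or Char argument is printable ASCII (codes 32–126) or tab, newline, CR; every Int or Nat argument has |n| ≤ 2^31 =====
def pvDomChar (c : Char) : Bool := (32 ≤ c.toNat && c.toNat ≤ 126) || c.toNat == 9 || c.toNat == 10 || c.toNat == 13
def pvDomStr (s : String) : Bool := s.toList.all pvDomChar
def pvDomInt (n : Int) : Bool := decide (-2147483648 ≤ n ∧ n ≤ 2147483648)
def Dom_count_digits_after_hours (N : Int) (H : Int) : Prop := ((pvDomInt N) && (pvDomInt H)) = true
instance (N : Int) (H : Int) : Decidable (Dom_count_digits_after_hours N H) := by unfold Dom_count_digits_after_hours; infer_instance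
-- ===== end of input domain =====

-- B replaces A's hour-by-hour simulation of the exponentially growing digit
-- list by a closed-form count summed once per digit of N (intended as faster:
-- a timing run saw A time out where B returned; no ratio was measurable
-- at sizes where both finish).

-- int(c) for a single character c (Python's int(); under Pre_ every character
-- of str(N) is a decimal digit, so the getD default is never reached)
def pvDigit (c : Char) : Int := (PySem.Int.ofChars? [c]).getD 0

-- ===== PORT A =====
def count_digits_after_hours (N : Int) (H : Int) : Int :=
  -- digits = [int(d) for d in str(N)]
  let digits0 : List Int := (PySem.Int.toChars N).map pvDigit
  -- for _ in range(H): rebuild the list, extending by divmod(d+2, 10) on overflow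
  -- new_digits is a Python list built by append/extend: ported as Array.push
  let final : List Int :=
    (PySem.List.pyRange 0 H).foldl
      (fun digits _ =>
        (digits.foldl
          (fun (new_digits : Array Int) d =>
            if d + 2 > 9 then
              (let p := (PySem.Int.divmod? (d + 2) 10).getD (0, 0)
               (new_digits.push p.1).push p.2)
            else new_digits.push (d + 2)) #[]).toList)
      digits0
  (final.length : Int)

-- ===== PORT B =====
def count_digits_after_hours_alt (N : Int) (H : Int) : Int :=
  (PySem.Int.toChars N).foldl
    (fun total c =>
      let d := pvDigit c
      let s := PySem.Int.floordiv (11 - d) 2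
      total + (if H < s then 1 else 2 ^ (PySem.Int.floordiv (H - s) 5 + 1).toNat))
    0

-- ===== PRECONDITION & SPEC =====
-- Pre_ excludes N < 0: there str(N) starts with '-' and int('-') raises
-- ValueError in A (and in B alike).
def Pre_count_digits_after_hours (N : Int) (H : Int) : Prop := 0 ≤ N
instance (N : Int) (H : Int) : Decidable (Pre_count_digits_after_hours N H) := by
  unfold Pre_count_digits_after_hours; infer_instance
def pvWitness_count_digits_after_hours : Int × Int := (89, 7)

def Spec_count_digits_after_hours (N : Int) (H : Int) (out : Int) : Prop := out = count_digits_after_hours_alt N H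
instance (N : Int) (H : Int) (out : Int) : Decidable (Spec_count_digits_after_hours N H out) := by unfold Spec_count_digits_after_hours; infer_instance

-- ===== CLAIM (what is proved, stated in full; the proofs are below) =====
def Claim_equal_count_digits_after_hours : Prop := ∀ (N : Int) (H : Int), Dom_count_digits_after_hours N H → Pre_count_digits_after_hours N H → Spec_count_digits_after_hours N H (count_digits_after_hours N H)

-- ===== LEMMAS AND PROOFS =====

-- one hour of growth for a single digit
def pvU (d : Int) : List Int :=
  if d + 2 > 9 then
    (let p := (PySem.Int.divmod? (d + 2) 10).getD (0, 0); [p.1, p.2])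
  else [d + 2]

-- one hour of growth for the whole list (A's inner loop)
def pvStep (ds : List Int) : List Int :=
  (ds.foldl
    (fun (new_digits : Array Int) d =>
      if d + 2 > 9 then
        (let p := (PySem.Int.divmod? (d + 2) 10).getD (0, 0)
         (new_digits.push p.1).push p.2)
      else new_digits.push (d + 2)) #[]).toList

-- closed-form count contributed by a single digit d after h hours
def pvF (d : Int) (h : Nat) : Nat :=
  let s := (11 - d).toNat / 2
  if h < s then 1 else 2 ^ ((h - s) / 5 + 1)

lemma pvStep_aux (ds : List Int) : ∀ a : Array Int,
    (ds.foldl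
      (fun (new_digits : Array Int) d =>
        if d + 2 > 9 then
          (let p := (PySem.Int.divmod? (d + 2) 10).getD (0, 0)
           (new_digits.push p.1).push p.2)
        else new_digits.push (d + 2)) a).toList = a.toList ++ ds.flatMap pvU := by
  induction ds with
  | nil => simp
  | cons d tl ih =>
    intro a
    simp only [List.foldl_cons, List.flatMap_cons]
    by_cases hd : d + 2 > 9
    · rw [if_pos hd, ih, pvU, if_pos hd]
      simp
    · rw [if_neg hd, ih, pvU, if_neg hd]
      simp

lemma pvStep_eq_flatMap (ds : List Int) : pvStep ds = ds.flatMap pvU := by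
  rw [pvStep, pvStep_aux]
  simp

lemma pvU_bounds (d : Int) (h0 : 0 ≤ d) (h9 : d ≤ 9) :
    ∀ e ∈ pvU d, 0 ≤ e ∧ e ≤ 9 := by
  interval_cases d <;> decide

lemma pv_split8 (h : Nat) : ((pvU 8).map (fun e => pvF e h)).sum = pvF 8 (h + 1) := by
  have e : pvU 8 = [1, 0] := by decide
  have e1 : (11 - (1:Int)).toNat = 10 := by decide
  have e0 : (11 - (0:Int)).toNat = 11 := by decide
  have e8 : (11 - (8:Int)).toNat = 3 := by decide
  rw [e]; simp only [pvF, e1, e0, e8, List.map_cons, List.map_nil, List.sum_cons, List.sum_nil]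
  norm_num
  split_ifs with h1
  · have h5 : h / 5 = 0 := by omega
    simp [h5]
  · have e2 : (h - 5) / 5 + 1 + 1 = h / 5 + 1 := by omega
    rw [← two_mul, ← pow_succ', e2]

lemma pv_split9 (h : Nat) : ((pvU 9).map (fun e => pvF e h)).sum = pvF 9 (h + 1) := by
  have e : pvU 9 = [1, 1] := by decide
  have e1 : (11 - (1:Int)).toNat = 10 := by decide
  have e9 : (11 - (9:Int)).toNat = 2 := by decide
  rw [e]; simp only [pvF, e1, e9, List.map_cons, List.map_nil, List.sum_cons, List.sum_nil]
  norm_num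
  split_ifs with h1
  · have h5 : h / 5 = 0 := by omega
    simp [h5]
  · have e2 : (h - 5) / 5 + 1 + 1 = h / 5 + 1 := by omega
    rw [← two_mul, ← pow_succ', e2]

lemma pvU_sum (d : Int) (h0 : 0 ≤ d) (h9 : d ≤ 9) (h : Nat) :
    ((pvU d).map (fun e => pvF e h)).sum = pvF d (h + 1) := by
  interval_cases d
  · norm_num [pvU, pvF]; split_ifs <;> first | rfl | omega
  · norm_num [pvU, pvF]; split_ifs <;> first | rfl | omega
  · norm_num [pvU, pvF]; split_ifs <;> first | rfl | omega
  · norm_num [pvU, pvF]; split_ifs <;> first | rfl | omega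
  · norm_num [pvU, pvF]; split_ifs <;> first | rfl | omega
  · norm_num [pvU, pvF]; split_ifs <;> first | rfl | omega
  · norm_num [pvU, pvF]; split_ifs <;> first | rfl | omega
  · norm_num [pvU, pvF]; split_ifs <;> first | rfl | omega
  · exact pv_split8 h
  · exact pv_split9 h

lemma pv_sum_map_flatMap {α β : Type} (l : List α) (f : α → List β) (g : β → Nat) :
    ((l.flatMap f).map g).sum = (l.map (fun x => ((f x).map g).sum)).sum := by
  induction l with
  | nil => rfl
  | cons x xs ih => simp [List.flatMap_cons, ih]

lemma pvLen (h : Nat) : ∀ ds : List Int, (∀ d ∈ ds, 0 ≤ d ∧ d ≤ 9) →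
    ((pvStep^[h]) ds).length = (ds.map (fun d => pvF d h)).sum := by
  induction h with
  | zero =>
    intro ds hb
    simp only [Function.iterate_zero, id]
    induction ds with
    | nil => rfl
    | cons d tl ih =>
      have hd := hb d List.mem_cons_self
      have h1 : pvF d 0 = 1 := by
        simp only [pvF]
        rw [if_pos]; omega
      simp only [List.map_cons, List.sum_cons, List.length_cons, h1,
        ih (fun e he => hb e (List.mem_cons_of_mem _ he))]
      omega
  | succ h ih =>
    intro ds hb
    have hb' : ∀ d ∈ pvStep ds, 0 ≤ d ∧ d ≤ 9 := by
      rw [pvStep_eq_flatMap]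
      intro e he
      rcases List.mem_flatMap.mp he with ⟨d, hd, hed⟩
      exact pvU_bounds d (hb d hd).1 (hb d hd).2 e hed
    rw [Function.iterate_succ_apply, ih _ hb', pvStep_eq_flatMap,
      pv_sum_map_flatMap]
    congr 1
    exact List.map_congr_left (fun d hd => pvU_sum d (hb d hd).1 (hb d hd).2 h)

-- the characters of str(N) for N ≥ 0 are decimal digit characters
lemma pv_toDigitsCore_mem (fuel n : Nat) (acc : List Char) (c : Char)
    (hc : c ∈ Nat.toDigitsCore 10 fuel n acc) :
    c ∈ acc ∨ ∃ k, k < 10 ∧ c = Nat.digitChar k := by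
  induction fuel generalizing n acc with
  | zero => simp only [Nat.toDigitsCore] at hc; exact Or.inl hc
  | succ fuel ih =>
    simp only [Nat.toDigitsCore] at hc
    split at hc
    · rcases List.mem_cons.mp hc with h | h
      · exact Or.inr ⟨n % 10, Nat.mod_lt _ (by norm_num), h⟩
      · exact Or.inl h
    · rcases ih _ _ hc with h | h
      · rcases List.mem_cons.mp h with h2 | h2
        · exact Or.inr ⟨n % 10, Nat.mod_lt _ (by norm_num), h2⟩
        · exact Or.inl h2
      · exact Or.inr h

-- the characters of str(N) for N ≥ 0 are decimal digit characters
lemma pv_toChars_digits (N : Int) (hN : 0 ≤ N) :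
    ∀ c ∈ PySem.Int.toChars N, ∃ k, k < 10 ∧ c = Nat.digitChar k := by
  intro c hc
  rw [PySem.Int.toChars, if_neg (by omega)] at hc
  rcases pv_toDigitsCore_mem _ _ _ _ hc with h | h
  · simp at h
  · exact h

lemma pvDigit_bounds (c : Char) (k : Nat) (hk : k < 10) (hc : c = Nat.digitChar k) :
    0 ≤ pvDigit c ∧ pvDigit c ≤ 9 := by
  subst hc; interval_cases k <;> decide

lemma pv_foldl_const {α β : Type} (f : α → α) (l : List β) (init : α) :
    l.foldl (fun s _ => f s) init = f^[l.length] init := by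
  induction l generalizing init with
  | nil => rfl
  | cons x xs ih => simpa [Function.iterate_succ_apply] using ih (f init)

-- ===== VERDICT (by name: the statement is the Claim_ definition above) =====
lemma pv_pyRange_len (H : Int) : (PySem.List.pyRange 0 H).length = H.toNat := by
  rcases Int.eq_nat_or_neg H with ⟨n, rfl | rfl⟩
  · rw [PySem.List.pyRange_zero_natCast]; simp
  · rw [PySem.List.pyRange_one_eq_nil (by omega)]; simp

-- B's per-character Int-arithmetic term equals the Nat closed form pvF
lemma pv_termB (H d : Int) (h0 : 0 ≤ d) (h9 : d ≤ 9) :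
    (if H < PySem.Int.floordiv (11 - d) 2 then (1 : Int)
     else 2 ^ (PySem.Int.floordiv (H - PySem.Int.floordiv (11 - d) 2) 5 + 1).toNat)
    = (pvF d H.toNat : Int) := by
  have hfd : PySem.Int.floordiv (11 - d) 2 = (11 - d) / 2 :=
    PySem.Int.floordiv_eq_ediv_of_pos (by omega)
  have hs : PySem.Int.floordiv (11 - d) 2 = (((11 - d).toNat / 2 : Nat) : Int) := by
    rw [hfd]; omega
  simp only [pvF, hs]
  split_ifs with h1 h2 h2
  · rfl
  · exfalso; omega
  · exfalso; omega
  · rw [PySem.Int.floordiv_eq_ediv_of_pos (by omega : (0:Int) < 5)]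
    have he : ((H - ((11 - d).toNat / 2 : Nat)) / 5 + 1).toNat
        = (H.toNat - (11 - d).toNat / 2) / 5 + 1 := by omega
    rw [he]; push_cast; ring

-- ===== VERDICT (by name: the statement is the Claim_ definition above) =====
theorem count_digits_after_hours_spec : Claim_equal_count_digits_after_hours := by
  intro N H _ hPre
  rw [Spec_count_digits_after_hours]
  have hb : ∀ d ∈ (PySem.Int.toChars N).map pvDigit, 0 ≤ d ∧ d ≤ 9 := by
    intro d hd
    rcases List.mem_map.mp hd with ⟨c, hc, rfl⟩
    rcases pv_toChars_digits N hPre c hc with ⟨k, hk, hck⟩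
    exact pvDigit_bounds c k hk hck
  -- A's outer loop is iteration of pvStep, H.toNat times
  have hA : count_digits_after_hours N H
      = (((pvStep^[H.toNat]) ((PySem.Int.toChars N).map pvDigit)).length : Int) := by
    show (((PySem.List.pyRange 0 H).foldl (fun s _ => pvStep s)
        ((PySem.Int.toChars N).map pvDigit)).length : Int) = _
    rw [pv_foldl_const, pv_pyRange_len]
  -- B's fold is the sum of the per-character closed forms
  have hB : count_digits_after_hours_alt N H
      = ((PySem.Int.toChars N).map (fun c =>
          if H < PySem.Int.floordiv (11 - pvDigit c) 2 then (1 : Int)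
          else 2 ^ (PySem.Int.floordiv (H - PySem.Int.floordiv (11 - pvDigit c) 2) 5
            + 1).toNat)).sum := by
    show (PySem.Int.toChars N).foldl (fun total c => total + _) 0 = _
    rw [PySem.List.foldl_add, zero_add]
  rw [hA, hB, pvLen H.toNat _ hb]
  rw [List.map_map]
  rw [Nat.cast_list_sum, List.map_map]
  congr 1
  refine List.map_congr_left ?_
  intro c hc
  rcases pv_toChars_digits N hPre c hc with ⟨k, hk, hck⟩
  have hbc := pvDigit_bounds c k hk hck
  simp only [Function.comp_apply]
  exact (pv_termB H (pvDigit c) hbc.1 hbc.2).symm
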